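-- pv_equiv track=rewrite | github.com/JumuFENG/pyphon | pyphon/accounts.py | merge_cum_deals
-- ===== SOURCE A (Python) =====
-- def merge_cum_deals(deals):
--     # 合并时间相同的融资利息
--     tdeals = {}
--     for d in deals:
--         if d['time'] in tdeals:
--             tdeals[d['time']]['price'] += d['price']
--         else:
--             tdeals[d['time']] = d
--
--     return list(tdeals.values())
-- ===== SOURCE B (Python) =====
-- def merge_cum_deals(deals):
--     # Two-pass decomposition: first total the prices per time, then keep the
--     # first-occurrence dict per time (in order) with its price set to the total.
--     sums = {}
--     for d in deals:
--         t = d['time']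
--         sums[t] = sums.get(t, 0) + d['price']
--     res = []
--     seen = set()
--     for d in deals:
--         t = d['time']
--         if t not in seen:
--             seen.add(t)
--             d['price'] = sums[t]
--             res.append(d)
--     return res
-- ===== Notes on version B (the rewrite author's own statement) =====
-- stated objective: alternative
-- what changed: A builds a time-keyed dict in one pass, accumulating prices into the stored first-occurrence dict; B uses a two-pass decomposition: first a plain per-time price-total dict, then a seen-set scan that emits each first-occurrence dict with its price set to the total.
-- outside the precondition, e.g. on merge_cum_deals([{'time': 1}]): A returns [{'time': 1}], B raises KeyError
import Mathlib
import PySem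

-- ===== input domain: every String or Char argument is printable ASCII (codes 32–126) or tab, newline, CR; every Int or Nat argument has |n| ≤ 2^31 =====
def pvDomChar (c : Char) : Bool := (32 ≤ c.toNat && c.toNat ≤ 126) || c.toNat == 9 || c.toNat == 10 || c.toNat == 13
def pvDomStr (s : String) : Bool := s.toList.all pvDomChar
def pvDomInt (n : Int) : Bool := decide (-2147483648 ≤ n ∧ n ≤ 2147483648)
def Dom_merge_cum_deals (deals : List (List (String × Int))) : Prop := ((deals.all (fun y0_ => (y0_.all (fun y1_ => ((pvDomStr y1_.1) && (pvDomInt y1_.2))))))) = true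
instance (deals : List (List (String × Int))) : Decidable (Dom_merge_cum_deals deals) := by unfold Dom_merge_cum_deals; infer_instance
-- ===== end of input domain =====

-- B replaces A's accumulate-into-the-dict single pass by a two-pass decomposition
-- (first total prices per time, then emit first occurrences with the total); objective: alternative.
-- Note: the Python A and B mutate the first-occurrence deal dicts in place; the equivalence
-- proved here is about the RETURN value only.

-- ===== PORT A =====
-- d['time'] / d['price'] are KeyError when missing; Pre_ guarantees both keys are
-- present (and deal keys unique, as in a real Python dict), so getD's default is never used.
def merge_cum_deals (deals : List (List (String × Int))) : List (List (String × Int)) :=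
  let tdeals : PySem.Dict Int (List (String × Int)) :=
    deals.foldl (fun td d =>
      let t := (PySem.Dict.mk d).getD "time" 0
      if td.contains t then
        td.modify t [] (fun stored =>
          ((PySem.Dict.mk stored).modify "price" 0 (· + (PySem.Dict.mk d).getD "price" 0)).items)
      else
        td.insert t d) PySem.Dict.empty
  tdeals.values

-- ===== PORT B =====
def merge_cum_deals_alt (deals : List (List (String × Int))) : List (List (String × Int)) :=
  let sums : PySem.Dict Int Int :=
    deals.foldl (fun s d =>
      s.modify ((PySem.Dict.mk d).getD "time" 0) 0
        (· + (PySem.Dict.mk d).getD "price" 0)) PySem.Dict.empty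
  (deals.foldl (fun (acc : PySem.Set Int × List (List (String × Int))) d =>
      let t := (PySem.Dict.mk d).getD "time" 0
      if acc.1.contains t then acc
      else (acc.1.add t, acc.2 ++ [((PySem.Dict.mk d).insert "price" (sums.getD t 0)).items]))
    (([] : PySem.Set Int), [])).2

-- ===== PRECONDITION & SPEC =====
-- Pre_ excludes deals missing the 'time' or 'price' key (A raises KeyError on a missing
-- 'time', and on a missing 'price' of a duplicated time; B raises on any missing 'price'),
-- and association lists with duplicate keys, which do not represent a Python dict.
def Pre_merge_cum_deals (deals : List (List (String × Int))) : Prop :=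
  ∀ d ∈ deals, (d.map Prod.fst).Nodup ∧ "time" ∈ d.map Prod.fst ∧ "price" ∈ d.map Prod.fst
instance (deals : List (List (String × Int))) : Decidable (Pre_merge_cum_deals deals) := by
  unfold Pre_merge_cum_deals; infer_instance
def pvWitness_merge_cum_deals : (List (List (String × Int))) :=
  [[("time", 1), ("price", 2)], [("time", 1), ("price", 3)], [("time", 2), ("price", 5)]]
def Spec_merge_cum_deals (deals : List (List (String × Int))) (out : List (List (String × Int))) : Prop := out = merge_cum_deals_alt deals
instance (deals : List (List (String × Int))) (out : List (List (String × Int))) : Decidable (Spec_merge_cum_deals deals out) := by unfold Spec_merge_cum_deals; infer_instance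

-- ===== CLAIM (what is proved, stated in full; the proofs are below) =====
def Claim_equal_merge_cum_deals : Prop := ∀ (deals : List (List (String × Int))), Dom_merge_cum_deals deals → Pre_merge_cum_deals deals → Spec_merge_cum_deals deals (merge_cum_deals deals)

-- ===== LEMMAS AND PROOFS =====

-- d['time'], d['price'], first-occurrence deal, total price and distinct times of a list of deals
def pvKey (d : List (String × Int)) : Int := (PySem.Dict.mk d).getD "time" 0
def pvPrice (d : List (String × Int)) : Int := (PySem.Dict.mk d).getD "price" 0
def pvTimes (l : List (List (String × Int))) : List Int := PySem.Set.ofList (l.map pvKey)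
def pvFirst (l : List (List (String × Int))) (t : Int) : List (String × Int) :=
  (l.find? (fun d => pvKey d == t)).getD []
def pvTotal (l : List (List (String × Int))) (t : Int) : Int :=
  ((l.filter (fun d => pvKey d == t)).map pvPrice).sum
def pvEntry (l : List (List (String × Int))) (t : Int) : List (String × Int) :=
  ((PySem.Dict.mk (pvFirst l t)).insert "price" (pvTotal l t)).items
def pvGood (d : List (String × Int)) : Prop :=
  (d.map Prod.fst).Nodup ∧ "time" ∈ d.map Prod.fst ∧ "price" ∈ d.map Prod.fst
def pvSums (l : List (List (String × Int))) : PySem.Dict Int Int :=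
  l.foldl (fun s d =>
    s.modify ((PySem.Dict.mk d).getD "time" 0) 0
      (· + (PySem.Dict.mk d).getD "price" 0)) PySem.Dict.empty
def pvStepA (td : PySem.Dict Int (List (String × Int))) (d : List (String × Int)) :
    PySem.Dict Int (List (String × Int)) :=
  let t := (PySem.Dict.mk d).getD "time" 0
  if td.contains t then
    td.modify t [] (fun stored =>
      ((PySem.Dict.mk stored).modify "price" 0 (· + (PySem.Dict.mk d).getD "price" 0)).items)
  else
    td.insert t d

lemma pv_eq_of_fst_eq {α β : Type} (l : List (α × β)) (h : (l.map Prod.fst).Nodup)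
    {p q : α × β} (hp : p ∈ l) (hq : q ∈ l) (e : p.1 = q.1) : p = q := by
  induction l with
  | nil => cases hp
  | cons a l ih =>
    simp only [List.map_cons, List.nodup_cons] at h
    rcases List.mem_cons.1 hp with hp | hp <;> rcases List.mem_cons.1 hq with hq | hq
    · rw [hp, hq]
    · exact absurd (show a.1 ∈ l.map Prod.fst by
        rw [← hp, e]; exact List.mem_map_of_mem hq) h.1
    · exact absurd (show a.1 ∈ l.map Prod.fst by
        rw [← hq, ← e]; exact List.mem_map_of_mem hp) h.1
    · exact ih h.2 hp hq

def pvStepB (s : PySem.Dict Int Int) (acc : PySem.Set Int × List (List (String × Int)))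
    (d : List (String × Int)) : PySem.Set Int × List (List (String × Int)) :=
  let t := (PySem.Dict.mk d).getD "time" 0
  if acc.1.contains t then acc
  else (acc.1.add t, acc.2 ++ [((PySem.Dict.mk d).insert "price" (s.getD t 0)).items])

lemma pv_insert_price_self (d : List (String × Int)) (hg : pvGood d) :
    ((PySem.Dict.mk d).insert "price" (pvPrice d)).items = d := by
  obtain ⟨hnd, -, hpk⟩ := hg
  rcases List.mem_map.1 hpk with ⟨p, hpmem, hp1⟩
  have hmem : ("price", p.2) ∈ d := by
    have : p = ("price", p.2) := Prod.ext hp1 rfl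
    rw [← this]; exact hpmem
  have hknd : (PySem.Dict.mk d).keys.Nodup := by rw [PySem.Dict.keys_mk]; exact hnd
  have hgd : pvPrice d = p.2 :=
    PySem.Dict.getD_of_mem_items (PySem.Dict.mk d) hmem hknd 0
  have hcont : (PySem.Dict.mk d).contains "price" = true := by
    rw [PySem.Dict.contains_iff_mem_keys, PySem.Dict.keys_mk]; exact hpk
  rw [PySem.Dict.items_insert_of_contains _ _ hcont]
  show d.map (fun q => if (q.1 == "price") = true then ("price", pvPrice d) else q) = d
  conv_rhs => rw [← List.map_id d]
  refine List.map_congr_left (fun q hq => ?_)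
  by_cases hq1 : q.1 = "price"
  · have : q = ("price", p.2) := pv_eq_of_fst_eq d hnd hq hmem (by simpa using hq1)
    simp [this, hgd]
  · simp [hq1]

lemma pv_times_append (l : List (List (String × Int))) (d : List (String × Int)) :
    pvTimes (l ++ [d]) = PySem.Set.add (pvTimes l) (pvKey d) := by
  simp [pvTimes, PySem.Set.ofList_append, PySem.Set.update_cons, PySem.Set.update_nil]

lemma pv_mem_times {l : List (List (String × Int))} {t : Int} :
    t ∈ pvTimes l ↔ ∃ d ∈ l, pvKey d = t := by
  simp [pvTimes, PySem.Set.mem_ofList, eq_comm]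

lemma pv_first_append_of_mem {l : List (List (String × Int))} {t : Int}
    (h : t ∈ pvTimes l) (d : List (String × Int)) : pvFirst (l ++ [d]) t = pvFirst l t := by
  rcases pv_mem_times.1 h with ⟨a, ha, hk⟩
  have : ∃ x, l.find? (fun d => pvKey d == t) = some x := by
    have := List.find?_isSome (p := fun d => pvKey d == t) (xs := l)
    rcases Option.isSome_iff_exists.1 (this.2 ⟨a, ha, by simp [hk]⟩) with ⟨x, hx⟩
    exact ⟨x, hx⟩
  rcases this with ⟨x, hx⟩
  simp [pvFirst, List.find?_append, hx]

lemma pv_first_append_self {l : List (List (String × Int))} {d : List (String × Int)}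
    (h : ¬ pvKey d ∈ pvTimes l) : pvFirst (l ++ [d]) (pvKey d) = d := by
  have hn : l.find? (fun a => pvKey a == pvKey d) = none := by
    rw [List.find?_eq_none]
    intro a ha
    simp only [beq_iff_eq]
    exact fun e => h (pv_mem_times.2 ⟨a, ha, e⟩)
  simp [pvFirst, List.find?_append, hn]

lemma pv_total_append (l : List (List (String × Int))) (d : List (String × Int)) (t : Int) :
    pvTotal (l ++ [d]) t = pvTotal l t + (if pvKey d = t then pvPrice d else 0) := by
  by_cases h : pvKey d = t <;> simp [pvTotal, List.filter_append, h]

lemma pv_total_eq_zero {l : List (List (String × Int))} {t : Int}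
    (h : ¬ t ∈ pvTimes l) : pvTotal l t = 0 := by
  have : l.filter (fun d => pvKey d == t) = [] := by
    rw [List.filter_eq_nil_iff]
    intro a ha
    simp only [beq_iff_eq]
    exact fun e => h (pv_mem_times.2 ⟨a, ha, e⟩)
  simp [pvTotal, this]

lemma pvKey_def (d : List (String × Int)) : pvKey d = (PySem.Dict.mk d).getD "time" 0 := rfl
lemma pvPrice_def (d : List (String × Int)) : pvPrice d = (PySem.Dict.mk d).getD "price" 0 := rfl

lemma pv_foldA_items (l : List (List (String × Int))) (h : ∀ d ∈ l, pvGood d) :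
    (l.foldl pvStepA PySem.Dict.empty).items
      = (pvTimes l).map (fun t => (t, pvEntry l t)) := by
  induction l using List.reverseRecOn with
  | nil => simp [pvTimes, PySem.Set.ofList, PySem.Dict.empty]
  | append_singleton l d ih =>
    have hgood : ∀ a ∈ l, pvGood a := fun a ha => h a (List.mem_append_left _ ha)
    have hgd : pvGood d := h d (by simp)
    have ihl := ih hgood
    have hkeys : (l.foldl pvStepA PySem.Dict.empty).keys = pvTimes l := by
      show (l.foldl pvStepA PySem.Dict.empty).items.map Prod.fst = pvTimes l
      rw [ihl, List.map_map]; simp [Function.comp_def]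
    have hknd : (l.foldl pvStepA PySem.Dict.empty).keys.Nodup := by
      rw [hkeys]; exact PySem.Set.nodup_ofList _
    rw [List.foldl_append, List.foldl_cons, List.foldl_nil]
    simp only [pvStepA, ← pvKey_def, ← pvPrice_def]
    by_cases hmem : pvKey d ∈ pvTimes l
    · have hcont : (l.foldl pvStepA PySem.Dict.empty).contains (pvKey d) = true := by
        rw [PySem.Dict.contains_iff_mem_keys, hkeys]; exact hmem
      have hentry : (l.foldl pvStepA PySem.Dict.empty).getD (pvKey d) [] = pvEntry l (pvKey d) :=
        PySem.Dict.getD_of_mem_items _ (by rw [ihl]; exact List.mem_map_of_mem hmem) hknd []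
      rw [if_pos hcont]
      simp only [PySem.Dict.modify, hentry]
      rw [PySem.Dict.items_insert_of_contains _ _ hcont, ihl]
      have htimes : pvTimes (l ++ [d]) = pvTimes l := by
        rw [pv_times_append, PySem.Set.add]; simp [PySem.Set.contains, hmem]
      rw [htimes, List.map_map]
      refine List.map_congr_left (fun t ht => ?_)
      simp only [Function.comp_apply]
      by_cases hteq : t = pvKey d
      · rw [if_pos (by simp [hteq])]
        refine Prod.ext hteq.symm ?_
        rw [hteq]
        have hR : pvEntry (l ++ [d]) (pvKey d)
            = ((PySem.Dict.mk (pvFirst l (pvKey d))).insert "price"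
                (pvTotal l (pvKey d) + pvPrice d)).items := by
          rw [pvEntry, pv_first_append_of_mem hmem, pv_total_append, if_pos rfl]
        rw [hR, pvEntry]
        show (((PySem.Dict.mk (pvFirst l (pvKey d))).insert "price"
            (pvTotal l (pvKey d))).modify "price" 0 (· + pvPrice d)).items = _
        rw [PySem.Dict.modify, PySem.Dict.getD_insert_self, PySem.Dict.insert_insert_self]
      · rw [if_neg (by simp [hteq])]
        rw [pvEntry, pvEntry, pv_first_append_of_mem ht, pv_total_append,
          if_neg (fun e => hteq e.symm), add_zero]
    · have hcont : (l.foldl pvStepA PySem.Dict.empty).contains (pvKey d) = false := by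
        rw [Bool.eq_false_iff]
        intro hc
        exact hmem (hkeys ▸ (PySem.Dict.contains_iff_mem_keys _ _).1 hc)
      rw [if_neg (by simp [hcont]), PySem.Dict.insert, hcont]
      simp only [Bool.false_eq_true, if_false]
      rw [ihl]
      have htimes : pvTimes (l ++ [d]) = pvTimes l ++ [pvKey d] := by
        rw [pv_times_append, PySem.Set.add]; simp [PySem.Set.contains, hmem]
      rw [htimes, List.map_append, List.map_cons, List.map_nil]
      congr 1
      · refine List.map_congr_left (fun t ht => ?_)
        have hne : t ≠ pvKey d := fun e => hmem (e ▸ ht)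
        rw [pvEntry, pvEntry, pv_first_append_of_mem ht, pv_total_append,
          if_neg (fun e => hne e.symm), add_zero]
      · have : pvEntry (l ++ [d]) (pvKey d) = d := by
          rw [pvEntry, pv_first_append_self hmem, pv_total_append, if_pos rfl,
            pv_total_eq_zero hmem, zero_add]
          exact pv_insert_price_self d hgd
        rw [this]

lemma pv_sums_getD (l : List (List (String × Int))) : ∀ (t : Int),
    (pvSums l).getD t 0 = pvTotal l t := by
  induction l using List.reverseRecOn with
  | nil => intro t; simp [pvSums, pvTotal, PySem.Dict.getD_empty]
  | append_singleton l d ih =>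
    intro t
    have hstep : pvSums (l ++ [d]) = (pvSums l).modify (pvKey d) 0 (· + pvPrice d) := by
      rw [pvSums, List.foldl_append, List.foldl_cons, List.foldl_nil]; rfl
    rw [hstep, PySem.Dict.modify, PySem.Dict.getD_insert]
    by_cases h : t = pvKey d
    · rw [if_pos h, pv_total_append, if_pos h.symm, ih, h]
    · rw [if_neg h, pv_total_append, if_neg (fun e => h e.symm), add_zero, ih]

lemma pv_foldB (l : List (List (String × Int))) (s : PySem.Dict Int Int) :
    (l.foldl (pvStepB s) (([] : PySem.Set Int), [])).1 = pvTimes l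
    ∧ (l.foldl (pvStepB s) (([] : PySem.Set Int), [])).2
      = (pvTimes l).map (fun t => ((PySem.Dict.mk (pvFirst l t)).insert "price" (s.getD t 0)).items) := by
  induction l using List.reverseRecOn with
  | nil => exact ⟨rfl, by simp [pvTimes, PySem.Set.ofList]⟩
  | append_singleton l d ih =>
    obtain ⟨ih1, ih2⟩ := ih
    rw [List.foldl_append, List.foldl_cons, List.foldl_nil]
    simp only [pvStepB, ← pvKey_def]
    by_cases hmem : pvKey d ∈ pvTimes l
    · have hcont : (l.foldl (pvStepB s) (([] : PySem.Set Int), [])).1.contains (pvKey d) = true := by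
        rw [ih1]; simpa [PySem.Set.contains] using hmem
      rw [if_pos hcont]
      have htimes : pvTimes (l ++ [d]) = pvTimes l := by
        rw [pv_times_append, PySem.Set.add]; simp [PySem.Set.contains, hmem]
      refine ⟨by rw [ih1, htimes], ?_⟩
      rw [ih2, htimes]
      exact List.map_congr_left (fun t ht => by rw [pv_first_append_of_mem ht])
    · have hcont : (l.foldl (pvStepB s) (([] : PySem.Set Int), [])).1.contains (pvKey d) = false := by
        rw [ih1, Bool.eq_false_iff]
        intro hc
        exact hmem (by simpa [PySem.Set.contains] using hc)
      rw [if_neg (ne_true_of_eq_false hcont)]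
      have htimes : pvTimes (l ++ [d]) = pvTimes l ++ [pvKey d] := by
        rw [pv_times_append, PySem.Set.add]; simp [PySem.Set.contains, hmem]
      refine ⟨?_, ?_⟩
      · show PySem.Set.add (l.foldl (pvStepB s) (([] : PySem.Set Int), [])).1 (pvKey d)
            = pvTimes (l ++ [d])
        rw [ih1, htimes, PySem.Set.add]; simp [PySem.Set.contains, hmem]
      · show (l.foldl (pvStepB s) (([] : PySem.Set Int), [])).2
            ++ [((PySem.Dict.mk d).insert "price" (s.getD (pvKey d) 0)).items] = _
        rw [ih2, htimes, List.map_append, List.map_cons, List.map_nil]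
        congr 1
        · exact List.map_congr_left (fun t ht => by rw [pv_first_append_of_mem ht])
        · rw [pv_first_append_self hmem]

-- ===== VERDICT (by name: the statement is the Claim_ definition above) =====
theorem merge_cum_deals_spec : Claim_equal_merge_cum_deals := by
  intro deals _ hpre
  show merge_cum_deals deals = merge_cum_deals_alt deals
  have hA : merge_cum_deals deals = (deals.foldl pvStepA PySem.Dict.empty).values := rfl
  rw [hA, PySem.Dict.values, pv_foldA_items deals hpre, List.map_map]
  have hB : merge_cum_deals_alt deals
      = (deals.foldl (fun (acc : PySem.Set Int × List (List (String × Int))) d =>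
          let t := (PySem.Dict.mk d).getD "time" 0
          if acc.1.contains t then acc
          else (acc.1.add t, acc.2 ++ [((PySem.Dict.mk d).insert "price" ((pvSums deals).getD t 0)).items]))
        (([] : PySem.Set Int), [])).2 := rfl
  have hBB : (deals.foldl (fun (acc : PySem.Set Int × List (List (String × Int))) d =>
          let t := (PySem.Dict.mk d).getD "time" 0
          if acc.1.contains t then acc
          else (acc.1.add t, acc.2 ++ [((PySem.Dict.mk d).insert "price" ((pvSums deals).getD t 0)).items]))
        (([] : PySem.Set Int), [])).2
      = (deals.foldl (pvStepB (pvSums deals)) (([] : PySem.Set Int), [])).2 := rfl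
  rw [hB, hBB, (pv_foldB deals (pvSums deals)).2]
  refine List.map_congr_left (fun t ht => ?_)
  simp only [Function.comp, pvEntry, pv_sums_getD]
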